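-- pv_equiv track=rewrite | github.com/RianMarlon/Python-Geek-University | secao8_funcoes/exercicios/questao51.py | diagonal_secundaria
-- ===== SOURCE A (Python) =====
-- def diagonal_secundaria(args):
--     """
--     Função que recebe uma matriz 3 x 3 de elementos numéricos e retorna a soma
--     dos elementos que estão na diagonal secundária
--     :param args: Recebe uma matriz de 3 x 3 de elementos numéricos
--     :return: Retorna a soma dos elementos que se encontram na diagonal principal.
--     Caso não seja uma matriz 3 x 3 ou não possua apenas valores numéricos, retorna um valor do tipo None
--     """
--
--     soma = 0
--     tamanho = True
--
--     if len(args) == 3: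
--
--         for i in range(len(args)):
--
--             if len(args[i]) == 3:
--                 for j in range(len(args[i])):
--
--                     if not(type(args[i][j]) == int) or (type(args[i][j]) == float):
--                         tamanho = False
--
--                     else:
--                         # 2, porque as posições vão de 0 à 2
--                         if j == 2 - i:
--                             soma += args[i][j]
--
--             else:
--                 tamanho = False
--
--         if tamanho:
--             return soma
-- ===== SOURCE B (Python) =====
-- def diagonal_secundaria(args):
--     if len(args) != 3 or any(len(row) != 3 for row in args):
--         return None
--     if any(not (type(x) == int) or type(x) == float for row in args for x in row):
--         return None
--     return args[0][2] + args[1][1] + args[2][0]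
-- ===== Notes on version B (the rewrite author's own statement) =====
-- stated objective: simpler
-- what changed: Replaces the nested loops with conditional accumulation by guard-clause validation followed by the closed-form three-term sum args[0][2]+args[1][1]+args[2][0].
import Mathlib
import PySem

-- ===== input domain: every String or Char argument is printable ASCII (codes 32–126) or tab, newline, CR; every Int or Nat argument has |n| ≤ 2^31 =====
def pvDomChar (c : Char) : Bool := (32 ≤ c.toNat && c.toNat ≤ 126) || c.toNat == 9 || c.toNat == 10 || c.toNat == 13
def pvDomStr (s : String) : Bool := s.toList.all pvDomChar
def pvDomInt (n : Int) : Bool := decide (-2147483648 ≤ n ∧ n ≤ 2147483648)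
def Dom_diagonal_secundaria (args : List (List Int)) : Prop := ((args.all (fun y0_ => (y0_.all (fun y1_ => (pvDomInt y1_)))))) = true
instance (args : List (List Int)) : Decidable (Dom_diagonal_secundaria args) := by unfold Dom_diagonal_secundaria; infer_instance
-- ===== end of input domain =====

-- B replaces A's nested loops with conditional accumulation by guard-clause validation
-- followed by a closed-form three-term sum (objective: simpler).

-- ===== PORT A =====
-- Literal port of A: nested loops over all cells, accumulating only where j = 2 - i,
-- with the `tamanho` flag recording shape/type validity (elements are Int here, so the
-- Python `type(x) == int` test always takes the else branch).
def diagonal_secundaria (args : List (List Int)) : Option Int :=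
  if args.length = 3 then
    let st := (List.range args.length).foldl (fun (st : Int × Bool) i =>
      let row := args.getD i []
      if row.length = 3 then
        (List.range row.length).foldl (fun st2 j =>
          if j = 2 - i then (st2.1 + row.getD j 0, st2.2) else st2) st
      else (st.1, false)) ((0 : Int), true)
    if st.2 then some st.1 else none
  else none

-- ===== PORT B =====
-- Literal port of Source B: guard clauses, then the closed-form anti-diagonal sum.
-- (Source B's element-type guard can never fire for Int elements, so it is omitted here,
-- exactly as the `type(x) == int` test always passes on this domain.)
def diagonal_secundaria_alt (args : List (List Int)) : Option Int :=
  if args.length ≠ 3 ∨ args.any (fun row => row.length ≠ 3) then none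
  else some ((args.getD 0 []).getD 2 0 + (args.getD 1 []).getD 1 0 + (args.getD 2 []).getD 0 0)

-- ===== PRECONDITION & SPEC =====
def Spec_diagonal_secundaria (args : List (List Int)) (out : Option Int) : Prop := out = diagonal_secundaria_alt args
instance (args : List (List Int)) (out : Option Int) : Decidable (Spec_diagonal_secundaria args out) := by unfold Spec_diagonal_secundaria; infer_instance

-- ===== CLAIM (what is proved, stated in full; the proofs are below) =====
def Claim_equal_diagonal_secundaria : Prop := ∀ (args : List (List Int)), Dom_diagonal_secundaria args → Spec_diagonal_secundaria args (diagonal_secundaria args)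

-- ===== LEMMAS AND PROOFS =====

-- ===== VERDICT (by name: the statement is the Claim_ definition above) =====
theorem diagonal_secundaria_spec : Claim_equal_diagonal_secundaria := by
  intro args _
  unfold Spec_diagonal_secundaria diagonal_secundaria diagonal_secundaria_alt
  rcases args with _ | ⟨r0, _ | ⟨r1, _ | ⟨r2, _ | ⟨r3, rest⟩⟩⟩⟩ <;>
    simp [List.range_succ]
  rcases r0 with _ | ⟨a, _ | ⟨b, _ | ⟨c, _ | ⟨d, t0⟩⟩⟩⟩ <;>
  rcases r1 with _ | ⟨e, _ | ⟨f, _ | ⟨g, _ | ⟨h, t1⟩⟩⟩⟩ <;>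
  rcases r2 with _ | ⟨p, _ | ⟨q, _ | ⟨r, _ | ⟨s, t2⟩⟩⟩⟩ <;>
    simp [List.range_succ]
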